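-- pv_equiv track=rewrite | github.com/MauMauMauMauMauMauMau/Advent-of-Code-2023 | 12/part1.py | check_assortment
-- ===== SOURCE A (Python) =====
-- def check_assortment(assortment, label):
--     index = 0
--     counters = []
--     while index < len(assortment):
--         counter = 0
--         if assortment[index] == '#':
--             while assortment[index] == '#':
--                 counter += 1
--                 index += 1
--                 if index >= len(assortment): break
--         if counter > 0: counters.append(counter)
--         index += 1
--     if counters == label: return True
--     else: return False
-- ===== SOURCE B (Python) =====
-- def check_assortment(assortment, label):
--     # Stage 1: normalize every non-'#' character to a space.
--     normalized = ''.join(ch if ch == '#' else ' ' for ch in assortment)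
--     # Stage 2: whitespace-split yields exactly the maximal '#'-runs; compare their lengths.
--     return [len(run) for run in normalized.split()] == label
-- ===== Notes on version B (the rewrite author's own statement) =====
-- stated objective: idiomatic
-- what changed: Replaced the index-walking nested while loops by staged passes: normalize every non-'#' character to a space, let str.split() extract the maximal '#'-runs, and compare the list of their lengths to the label.
import Mathlib
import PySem

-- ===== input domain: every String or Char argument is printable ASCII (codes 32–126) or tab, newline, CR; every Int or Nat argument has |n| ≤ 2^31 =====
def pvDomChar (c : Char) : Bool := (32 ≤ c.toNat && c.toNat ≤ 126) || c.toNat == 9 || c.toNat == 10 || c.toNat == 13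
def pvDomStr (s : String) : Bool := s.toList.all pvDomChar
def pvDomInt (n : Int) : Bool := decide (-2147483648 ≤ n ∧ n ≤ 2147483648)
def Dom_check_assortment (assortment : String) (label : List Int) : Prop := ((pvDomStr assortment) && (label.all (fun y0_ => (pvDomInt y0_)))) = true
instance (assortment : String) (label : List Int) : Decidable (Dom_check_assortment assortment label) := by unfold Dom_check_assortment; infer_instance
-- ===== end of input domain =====

-- B replaces A's index-walking nested while loops by staged passes: normalize every
-- non-'#' character to a space, str.split() off the '#'-runs, compare their lengths
-- to the label (objective: idiomatic).

-- ===== PORT A =====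
-- inner `while assortment[index] == '#'` loop: counter += 1; index += 1; break on end
def pvAInner (s : List Char) (index counter : Nat) : Nat × Nat :=
  if h : index < s.length then
    if s[index] = '#' then pvAInner s (index + 1) (counter + 1)
    else (index, counter)
  else (index, counter)
termination_by s.length - index

theorem pvAInner_fst_ge (s : List Char) (index counter : Nat) :
    index ≤ (pvAInner s index counter).1 := by
  unfold pvAInner
  split
  · split
    · have := pvAInner_fst_ge s (index + 1) (counter + 1); omega
    · simp
  · simp
termination_by s.length - index

-- outer `while index < len(assortment)` loop
def pvAOuter (s : List Char) (index : Nat) (counters : List Int) : List Int :=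
  if h : index < s.length then
    if s[index] = '#' then
      let p := pvAInner s index 0
      pvAOuter s (p.1 + 1) (if p.2 > 0 then counters ++ [(p.2 : Int)] else counters)
    else
      -- counter stays 0, nothing appended
      pvAOuter s (index + 1) counters
  else counters
termination_by s.length - index
decreasing_by
  · have := pvAInner_fst_ge s index 0; omega
  · omega

def check_assortment (assortment : String) (label : List Int) : Bool :=
  decide (pvAOuter assortment.toList 0 [] = label)

-- ===== PORT B =====
-- normalized = ''.join(ch if ch == '#' else ' ' for ch in assortment)
-- return [len(run) for run in normalized.split()] == label
def check_assortment_alt (assortment : String) (label : List Int) : Bool :=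
  let normalized := String.ofList (assortment.toList.map (fun ch => if ch = '#' then ch else ' '))
  decide ((PySem.Str.split₀ normalized).map (fun run => PySem.Str.len run) = label)

-- ===== PRECONDITION & SPEC =====
def Spec_check_assortment (assortment : String) (label : List Int) (out : Bool) : Prop := out = check_assortment_alt assortment label
instance (assortment : String) (label : List Int) (out : Bool) : Decidable (Spec_check_assortment assortment label out) := by unfold Spec_check_assortment; infer_instance

-- ===== CLAIM (what is proved, stated in full; the proofs are below) =====
def Claim_equal_check_assortment : Prop := ∀ (assortment : String) (label : List Int), Dom_check_assortment assortment label → Spec_check_assortment assortment label (check_assortment assortment label)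

-- ===== LEMMAS AND PROOFS =====

-- proof-only spec: run-length accumulation of '#'-runs (run = current run, counters = flushed)
def pvRuns (s : List Char) (run : Nat) (counters : List Int) : List Int :=
  match s with
  | [] => if run > 0 then counters ++ [(run : Int)] else counters
  | c :: rest =>
    if c = '#' then pvRuns rest (run + 1) counters
    else pvRuns rest 0 (if run > 0 then counters ++ [(run : Int)] else counters)

-- B's loop from position `index`, with counter `counter` already accumulated, equals
-- running A's inner loop to the end of the run, flushing, and continuing past the separator.
theorem pvRuns_inner (s : List Char) (index counter : Nat) (counters : List Int)
    (hle : index ≤ s.length) :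
    pvRuns (s.drop index) counter counters =
      (let p := pvAInner s index counter
       if p.1 < s.length then
         pvRuns (s.drop (p.1 + 1)) 0 (if p.2 > 0 then counters ++ [(p.2 : Int)] else counters)
       else (if p.2 > 0 then counters ++ [(p.2 : Int)] else counters)) := by
  by_cases h : index < s.length
  · rw [List.drop_eq_getElem_cons h]
    by_cases hc : s[index] = '#'
    · rw [show pvRuns (s[index] :: s.drop (index+1)) counter counters
            = pvRuns (s.drop (index+1)) (counter+1) counters by
          simp [pvRuns, hc]]
      rw [pvRuns_inner s (index+1) (counter+1) counters (by omega)]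
      simp only
      rw [show pvAInner s index counter = pvAInner s (index+1) (counter+1) by
        rw [pvAInner]; simp [h, hc]]
    · rw [show pvAInner s index counter = (index, counter) by
        rw [pvAInner]; simp [h, hc]]
      simp only [h, if_pos]
      simp [pvRuns, hc]
  · have hi : index = s.length := by omega
    rw [show pvAInner s index counter = (index, counter) by rw [pvAInner]; simp [h]]
    simp [hi, pvRuns]
termination_by s.length - index

theorem pvA_eq_runs (s : List Char) (index : Nat) (counters : List Int) :
    pvAOuter s index counters = pvRuns (s.drop index) 0 counters := by
  by_cases h : index < s.length
  · by_cases hc : s[index] = '#'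
    · rw [pvAOuter]; simp only [h, dif_pos, hc, if_pos]
      have hge := pvAInner_fst_ge s index 0
      rw [pvRuns_inner s index 0 counters (by omega)]
      simp only
      set p := pvAInner s index 0 with hp
      by_cases h2 : p.1 < s.length
      · simp only [h2, if_pos]
        exact pvA_eq_runs s (p.1 + 1) _
      · simp only [h2, if_false]
        rw [pvAOuter]
        simp [show ¬ p.1 + 1 < s.length by omega]
    · rw [pvAOuter]; simp only [h, dif_pos, hc, if_false]
      rw [pvA_eq_runs s (index + 1) counters]
      rw [List.drop_eq_getElem_cons h]
      simp [pvRuns, hc]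
  · rw [pvAOuter]
    rw [List.drop_eq_nil_of_le (show s.length ≤ index by omega)]
    simp [h, pvRuns]
termination_by s.length - index
decreasing_by
  · have := pvAInner_fst_ge s index 0; omega
  · omega

-- whitespace-splitting the normalized string and taking lengths = run-length accumulation
theorem pvSplit_eq_runs (s : List Char) (cur : List Char) (acc : List (List Char)) :
    (PySem.Chars.split₀.go (s.map (fun ch => if ch = '#' then ch else ' ')) cur acc).map
        (fun w => (w.length : Int))
      = pvRuns s cur.length (acc.reverse.map (fun w => (w.length : Int))) := by
  induction s generalizing cur acc with
  | nil =>
    simp only [List.map_nil, PySem.Chars.split₀.go, pvRuns]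
    by_cases hcur : cur.isEmpty
    · simp [hcur, List.isEmpty_iff_length_eq_zero.mp hcur]
    · have : 0 < cur.length := by
        rcases cur with _ | _ <;> simp_all
      simp [hcur, this]
  | cons c rest ih =>
    simp only [List.map_cons]
    by_cases hc : c = '#'
    · have hsp : PySem.Chars.isspace '#' = false := by decide
      rw [show (if c = '#' then c else ' ') = '#' by simp [hc]]
      rw [PySem.Chars.split₀.go, hsp]
      simp only [Bool.false_eq_true, if_false]
      rw [ih ('#' :: cur) acc]
      simp [pvRuns, hc]
    · have hsp : PySem.Chars.isspace ' ' = true := by decide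
      rw [show (if c = '#' then c else ' ') = ' ' by simp [hc]]
      rw [PySem.Chars.split₀.go, hsp]
      simp only [if_pos]
      by_cases hcur : cur.isEmpty
      · simp only [hcur, if_pos]
        rw [ih [] acc]
        have h0 : cur.length = 0 := List.isEmpty_iff_length_eq_zero.mp hcur
        simp [pvRuns, hc, h0]
      · simp only [hcur, Bool.false_eq_true, if_false]
        rw [ih [] (cur.reverse :: acc)]
        have h0 : 0 < cur.length := by
          rcases cur with _ | _ <;> simp_all
        simp [pvRuns, hc, h0]

-- ===== VERDICT (by name: the statement is the Claim_ definition above) =====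
theorem check_assortment_spec : Claim_equal_check_assortment := by
  intro assortment label _
  unfold Spec_check_assortment check_assortment check_assortment_alt
  rw [pvA_eq_runs assortment.toList 0 []]
  simp only [List.drop_zero]
  have hb : (PySem.Str.split₀ (String.ofList (assortment.toList.map (fun ch => if ch = '#' then ch else ' ')))).map
        (fun run => PySem.Str.len run)
      = pvRuns assortment.toList 0 [] := by
    rw [PySem.Str.split₀]
    rw [show (String.ofList (assortment.toList.map (fun ch => if ch = '#' then ch else ' '))).toList
          = assortment.toList.map (fun ch => if ch = '#' then ch else ' ') by simp]
    rw [List.map_map, PySem.Chars.split₀]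
    have := pvSplit_eq_runs assortment.toList [] []
    simp only [List.length_nil, List.reverse_nil, List.map_nil] at this
    rw [← this]
    congr 1
    funext w
    simp [PySem.Str.len]
  rw [hb]
  rfl
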